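-- pv_equiv track=rewrite | github.com/odylith/odylith | src/odylith/runtime/surfaces/install_mermaid_autosync_hook.py | _strip_existing_snippet
-- ===== SOURCE A (Python) =====
-- _HOOK_MARKER_BEGIN = "# >>> ODYLITH_MERMAID_AUTOSYNC_BEGIN"
--
-- _HOOK_MARKER_END = "# <<< ODYLITH_MERMAID_AUTOSYNC_END"
--
-- def _strip_existing_snippet(text: str) -> str:
--     if _HOOK_MARKER_BEGIN not in text or _HOOK_MARKER_END not in text:
--         return text
--     start = text.find(_HOOK_MARKER_BEGIN)
--     end = text.find(_HOOK_MARKER_END, start)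
--     if end == -1:
--         return text
--     end += len(_HOOK_MARKER_END)
--     while end < len(text) and text[end] in ("\n", "\r"):
--         end += 1
--     return text[:start] + text[end:]
-- ===== SOURCE B (Python) =====
-- _HOOK_MARKER_BEGIN = "# >>> ODYLITH_MERMAID_AUTOSYNC_BEGIN"
--
-- _HOOK_MARKER_END = "# <<< ODYLITH_MERMAID_AUTOSYNC_END"
--
--
-- def _strip_existing_snippet(text: str) -> str:
--     # Single left-to-right scan: copy characters into `kept` until the BEGIN
--     # marker starts at the cursor, then buffer the snippet into `pending` until
--     # the END marker starts at the cursor; on END, drop the buffer (plus the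
--     # marker and trailing newlines) and return; if the scan ends without END,
--     # the two buffers together are the whole text, returned verbatim.
--     kept = []
--     pending = []
--     in_snippet = False
--     i = 0
--     n = len(text)
--     while i < n:
--         if not in_snippet:
--             if text.startswith(_HOOK_MARKER_BEGIN, i):
--                 in_snippet = True
--             else:
--                 kept.append(text[i])
--                 i += 1
--         else:
--             if text.startswith(_HOOK_MARKER_END, i):
--                 i += len(_HOOK_MARKER_END)
--                 while i < n and text[i] in ("\n", "\r"):
--                     i += 1
--                 return "".join(kept) + text[i:]
--             pending.append(text[i])
--             i += 1
--     return "".join(kept) + "".join(pending)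
-- ===== Notes on version B (the rewrite author's own statement) =====
-- stated objective: alternative
-- what changed: Replaces A's staged find/index-arithmetic/slice-splice with a single left-to-right cursor scan: a two-mode state machine with kept/pending character accumulators (copy until BEGIN starts at the cursor, buffer until END starts at the cursor, then drop the buffer and trailing newlines), the unterminated/absent-marker cases falling out as kept+pending with no second pass or index computed.
import Mathlib
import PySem

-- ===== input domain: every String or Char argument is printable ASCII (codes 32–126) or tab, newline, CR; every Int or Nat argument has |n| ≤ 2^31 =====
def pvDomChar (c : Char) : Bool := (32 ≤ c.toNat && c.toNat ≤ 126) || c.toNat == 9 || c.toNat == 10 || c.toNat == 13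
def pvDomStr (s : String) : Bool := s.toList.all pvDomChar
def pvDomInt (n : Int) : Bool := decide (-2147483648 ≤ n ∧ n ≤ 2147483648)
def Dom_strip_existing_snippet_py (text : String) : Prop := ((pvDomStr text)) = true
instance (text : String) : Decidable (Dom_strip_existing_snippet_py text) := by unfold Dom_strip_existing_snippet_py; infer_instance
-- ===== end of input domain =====

-- B replaces A's staged find/index-arithmetic/slice with a single left-to-right scan: a two-mode
-- state machine with kept/pending accumulators and no index arithmetic (alternative; same cost class).

-- ===== PORT A =====
def pvBeginL : List Char := "# >>> ODYLITH_MERMAID_AUTOSYNC_BEGIN".toList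

def pvEndL : List Char := "# <<< ODYLITH_MERMAID_AUTOSYNC_END".toList

-- the while loop 'while end < len(text) and text[end] in ("\n", "\r"): end += 1';
-- the index is nonnegative at this point of A, so a Nat index is exact
def pvSkipNL (t : List Char) (i : Nat) : Nat :=
  if h : i < t.length then
    if t[i] == '\n' || t[i] == '\r' then pvSkipNL t (i + 1) else i
  else i
termination_by t.length - i

def strip_existing_snippet_py (text : String) : String :=
  let t := text.toList
  if !(PySem.Chars.isIn pvBeginL t) || !(PySem.Chars.isIn pvEndL t) then text
  else
    let start := PySem.Chars.find t pvBeginL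
    let e := PySem.Chars.findFrom t pvEndL start none
    if e = -1 then text
    else
      let e2 := e + 34          -- end += len(_HOOK_MARKER_END)
      let e3 := (pvSkipNL t e2.toNat : Int)
      String.ofList (PySem.List.slice t none (some start) ++ PySem.List.slice t (some e3) none)

-- ===== PORT B =====
-- B's single scan, one recursive function per mode; accumulators `kept`/`pending` are B's lists,
-- 'text.startswith(marker, i)' at the cursor is PySem.Chars.startswith on the remaining suffix.

-- mode 'in_snippet': buffer into pending until END starts at the cursor
def pvAltSkip (kept pending rest : List Char) : String :=
  if PySem.Chars.startswith rest pvEndL then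
    -- i += len(END); inner while over "\n","\r"; return "".join(kept) + text[i:]
    String.ofList (kept ++ (rest.drop 34).dropWhile (fun c => c == '\n' || c == '\r'))
  else
    match rest with
    | [] => String.ofList (kept ++ pending)      -- loop ended without END
    | c :: rs => pvAltSkip kept (pending ++ [c]) rs

-- mode 'copy': copy into kept until BEGIN starts at the cursor
def pvAltCopy (kept rest : List Char) : String :=
  if PySem.Chars.startswith rest pvBeginL then pvAltSkip kept [] rest
  else
    match rest with
    | [] => String.ofList (kept ++ [])           -- "".join(kept) + "".join(pending), pending = []
    | c :: rs => pvAltCopy (kept ++ [c]) rs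

def strip_existing_snippet_py_alt (text : String) : String :=
  pvAltCopy [] text.toList

-- ===== PRECONDITION & SPEC =====
def Spec_strip_existing_snippet_py (text : String) (out : String) : Prop := out = strip_existing_snippet_py_alt text
instance (text : String) (out : String) : Decidable (Spec_strip_existing_snippet_py text out) := by unfold Spec_strip_existing_snippet_py; infer_instance

-- ===== CLAIM (what is proved, stated in full; the proofs are below) =====
def Claim_equal_strip_existing_snippet_py : Prop := ∀ (text : String), Dom_strip_existing_snippet_py text → Spec_strip_existing_snippet_py text (strip_existing_snippet_py text)

-- ===== LEMMAS AND PROOFS =====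

-- the while loop drops exactly the leading newlines of the rest
theorem pvSkipNL_dropWhile (t : List Char) (i : Nat) :
    t.drop (pvSkipNL t i) = (t.drop i).dropWhile (fun c => c == '\n' || c == '\r') := by
  fun_induction pvSkipNL t i with
  | case1 i h hc ih =>
      rw [ih, List.drop_eq_getElem_cons h, List.dropWhile_cons_of_pos (by simpa using hc)]
  | case2 i h hc =>
      rw [List.drop_eq_getElem_cons h, List.dropWhile_cons_of_neg (by simpa using hc)]
  | case3 i h =>
      rw [List.drop_eq_nil_of_le (by omega)]; rfl

-- skip mode, END never occurs: the scan returns kept ++ pending ++ rest verbatim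
theorem pvAltSkip_no (rest : List Char) (h : ∀ j, ¬ pvEndL <+: rest.drop j) :
    ∀ kept pending, pvAltSkip kept pending rest = String.ofList (kept ++ pending ++ rest) := by
  induction rest with
  | nil =>
      intro kept pending
      rw [pvAltSkip, if_neg (fun (hsw : PySem.Chars.startswith [] pvEndL = true) =>
        h 0 ((PySem.Chars.startswith_iff _ _).mp hsw))]
      simp
  | cons c rs ih =>
      intro kept pending
      rw [pvAltSkip, if_neg (fun (hsw : PySem.Chars.startswith (c :: rs) pvEndL = true) =>
        h 0 ((PySem.Chars.startswith_iff _ _).mp hsw))]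
      rw [ih (fun j => h (j + 1)) kept (pending ++ [c])]
      simp

-- skip mode, first END at position e: the scan returns kept ++ (tail after END and newlines)
theorem pvAltSkip_found (rest : List Char) (e : Nat) (hp : pvEndL <+: rest.drop e)
    (hmin : ∀ i < e, ¬ pvEndL <+: rest.drop i) :
    ∀ kept pending, pvAltSkip kept pending rest =
      String.ofList (kept ++ (rest.drop (e + 34)).dropWhile (fun c => c == '\n' || c == '\r')) := by
  induction rest generalizing e with
  | nil =>
      intro kept pending
      simp only [List.drop_nil] at hp
      exact absurd hp (by decide)
  | cons c rs ih =>
      intro kept pending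
      cases e with
      | zero =>
          rw [pvAltSkip, if_pos ((PySem.Chars.startswith_iff _ _).mpr (by simpa using hp))]
      | succ k =>
          rw [pvAltSkip, if_neg (by
            intro hsw
            exact hmin 0 (Nat.succ_pos k) (by simpa using (PySem.Chars.startswith_iff _ _).mp hsw))]
          exact ih k (by simpa using hp) (fun i hi => by simpa using hmin (i + 1) (by omega))
            kept (pending ++ [c])

-- copy mode, BEGIN never occurs: the scan returns kept ++ rest verbatim
theorem pvAltCopy_no (rest : List Char) (h : ∀ j, ¬ pvBeginL <+: rest.drop j) :
    ∀ kept, pvAltCopy kept rest = String.ofList (kept ++ rest) := by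
  induction rest with
  | nil =>
      intro kept
      rw [pvAltCopy, if_neg (fun (hsw : PySem.Chars.startswith [] pvBeginL = true) =>
        h 0 ((PySem.Chars.startswith_iff _ _).mp hsw))]
  | cons c rs ih =>
      intro kept
      rw [pvAltCopy, if_neg (fun (hsw : PySem.Chars.startswith (c :: rs) pvBeginL = true) =>
        h 0 ((PySem.Chars.startswith_iff _ _).mp hsw))]
      rw [ih (fun j => h (j + 1)) (kept ++ [c])]
      simp

-- copy mode, first BEGIN at position s: the scan hands over to skip mode there
theorem pvAltCopy_found (rest : List Char) (s : Nat) (hp : pvBeginL <+: rest.drop s)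
    (hmin : ∀ i < s, ¬ pvBeginL <+: rest.drop i) :
    ∀ kept, pvAltCopy kept rest = pvAltSkip (kept ++ rest.take s) [] (rest.drop s) := by
  induction rest generalizing s with
  | nil =>
      intro kept
      simp only [List.drop_nil] at hp
      exact absurd hp (by decide)
  | cons c rs ih =>
      intro kept
      cases s with
      | zero =>
          rw [pvAltCopy, if_pos ((PySem.Chars.startswith_iff _ _).mpr (by simpa using hp))]
          simp
      | succ k =>
          rw [pvAltCopy, if_neg (by
            intro hsw
            exact hmin 0 (Nat.succ_pos k) (by simpa using (PySem.Chars.startswith_iff _ _).mp hsw))]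
          rw [ih k (by simpa using hp) (fun i hi => by simpa using hmin (i + 1) (by omega))
            (kept ++ [c])]
          simp

-- ===== VERDICT (by name: the statement is the Claim_ definition above) =====
theorem strip_existing_snippet_py_spec : Claim_equal_strip_existing_snippet_py := by
  intro text _
  unfold Spec_strip_existing_snippet_py strip_existing_snippet_py strip_existing_snippet_py_alt
  set t := text.toList with ht
  by_cases hbin : PySem.Chars.isIn pvBeginL t = true
  case neg =>
    -- BEGIN absent: both return text unchanged
    have hno : ∀ j, ¬ pvBeginL <+: t.drop j := by
      intro j hj
      exact hbin ((PySem.Chars.exists_prefix_drop_iff_isIn pvBeginL t).mp ⟨j, hj⟩)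
    rw [pvAltCopy_no t hno []]
    simp only [Bool.not_eq_true] at hbin
    simp [show PySem.Chars.isIn pvBeginL text.toList = false from hbin, ht]
  case pos =>
    have h0 : 0 ≤ PySem.Chars.find t pvBeginL :=
      (PySem.Chars.find_nonneg_iff t pvBeginL).mpr
        ((PySem.Chars.isIn_iff_infix pvBeginL t).mp hbin)
    set s := (PySem.Chars.find t pvBeginL).toNat with hs
    have hcast : PySem.Chars.find t pvBeginL = (s : Int) := by omega
    have hslen : s ≤ t.length := by
      have := PySem.Chars.find_le_length t pvBeginL; omega
    obtain ⟨hb, hbmin⟩ := PySem.Chars.find_spec (s := t) (sub := pvBeginL) h0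
    rw [pvAltCopy_found t s hb (fun i hi => hbmin i hi) []]
    have hff : PySem.Chars.findFrom t pvEndL (s : Int) none =
        if PySem.Chars.find (t.drop s) pvEndL = -1 then -1
        else (s : Int) + PySem.Chars.find (t.drop s) pvEndL :=
      PySem.Chars.findFrom_natCast t pvEndL s hslen
    by_cases hend : PySem.Chars.find (t.drop s) pvEndL = -1
    case pos =>
      -- no END at or after the snippet start: both return text unchanged
      have hnoE : ∀ j, ¬ pvEndL <+: (t.drop s).drop j := by
        intro j hj
        exact (PySem.Chars.find_eq_neg_one_iff _ _).mp hend
          ((PySem.Chars.isIn_iff_infix pvEndL (t.drop s)).mp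
            ((PySem.Chars.exists_prefix_drop_iff_isIn pvEndL (t.drop s)).mp ⟨j, hj⟩))
      rw [pvAltSkip_no _ hnoE]
      have hffv : PySem.Chars.findFrom t pvEndL (s : Int) none = -1 := by
        rw [hff, if_pos hend]
      rcases Bool.eq_false_or_eq_true (PySem.Chars.isIn pvEndL t) with he | he
      · simp [List.take_append_drop, ht,
          show PySem.Chars.isIn pvBeginL text.toList = true from hbin,
          show PySem.Chars.isIn pvEndL text.toList = true from he,
          show PySem.Chars.find text.toList pvBeginL = (s : Int) from hcast,
          show PySem.Chars.findFrom text.toList pvEndL (s : Int) none = -1 from hffv]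
      · simp [List.take_append_drop, ht,
          show PySem.Chars.isIn pvBeginL text.toList = true from hbin,
          show PySem.Chars.isIn pvEndL text.toList = false from he]
    case neg =>
      -- BEGIN and a later END both present: both strip the snippet
      have h02 : 0 ≤ PySem.Chars.find (t.drop s) pvEndL := by
        have := PySem.Chars.neg_one_le_find (t.drop s) pvEndL; omega
      set e := (PySem.Chars.find (t.drop s) pvEndL).toNat with he
      have hec : PySem.Chars.find (t.drop s) pvEndL = (e : Int) := by omega
      obtain ⟨hpE, hminE⟩ := PySem.Chars.find_spec (s := t.drop s) (sub := pvEndL) h02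
      rw [pvAltSkip_found (t.drop s) e hpE (fun i hi => hminE i hi)]
      have hffv : PySem.Chars.findFrom t pvEndL (s : Int) none = (s : Int) + (e : Int) := by
        rw [hff, if_neg hend, hec]
      have hein : PySem.Chars.isIn pvEndL t = true := by
        apply (PySem.Chars.exists_prefix_drop_iff_isIn pvEndL t).mp
        exact ⟨s + e, by rw [← List.drop_drop]; exact hpE⟩
      have hffne : ¬(((s : Int) + (e : Int)) = -1) := by omega
      have hToNat : ((s : Int) + (e : Int) + 34).toNat = s + e + 34 := by omega
      simp only [hcast, hffv, hffne, if_false, hbin, hein, Bool.not_true, hToNat,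
        PySem.List.slice_to_natCast, PySem.List.slice_from_natCast, pvSkipNL_dropWhile,
        Bool.or_self]
      rw [List.drop_drop, show s + (e + 34) = s + e + 34 from by omega]
      simp
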